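-- pv_equiv track=rewrite | github.com/KimDeokjung/AlgorithmProblem | codingTest/230621/2.py | solution
-- ===== SOURCE A (Python) =====
-- def solution(S):
--     checkSum = dict()
--     checkSum["A"] = checkSum["B"] = checkSum["N"] = 0
--     result = 0
--
--     for x in S:
--         if x in ["A", "B", "N"]:
--             checkSum[x] += 1
--
--     while checkSum["A"] >= 3 and checkSum["B"] >= 1 and checkSum["N"] >= 2:
--         result += 1
--         checkSum["A"] -= 3
--         checkSum["B"] -= 1
--         checkSum["N"] -= 2
--
--     return result
-- ===== SOURCE B (Python) =====
-- def solution(S):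
--     return min(S.count("A") // 3, S.count("B"), S.count("N") // 2)
-- ===== Notes on version B (the rewrite author's own statement) =====
-- stated objective: faster
-- what changed: Replaces the per-character dict-counting loop plus the repeated-subtraction while-loop with three str.count calls and a closed-form min(a//3, b, n//2).
import Mathlib
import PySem

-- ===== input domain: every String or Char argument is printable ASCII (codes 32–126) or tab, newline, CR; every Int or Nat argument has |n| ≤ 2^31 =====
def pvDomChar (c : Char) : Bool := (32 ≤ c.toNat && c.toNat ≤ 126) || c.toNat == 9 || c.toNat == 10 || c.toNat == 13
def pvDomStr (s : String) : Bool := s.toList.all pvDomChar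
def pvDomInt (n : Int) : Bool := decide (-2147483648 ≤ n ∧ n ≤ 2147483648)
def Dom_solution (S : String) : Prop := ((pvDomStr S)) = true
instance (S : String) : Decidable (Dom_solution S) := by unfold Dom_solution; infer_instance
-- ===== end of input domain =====

-- B replaces A's dict-counting loop + repeated-subtraction while-loop by three counts and a closed-form min.

-- ===== PORT A =====
-- the while loop of A: while A>=3 and B>=1 and N>=2: result+=1; A-=3; B-=1; N-=2
def solutionWhile (a b n result : Int) : Int :=
  if h : 3 ≤ a ∧ 1 ≤ b ∧ 2 ≤ n then
    solutionWhile (a - 3) (b - 1) (n - 2) (result + 1)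
  else result
termination_by a.toNat
decreasing_by omega

def solution (S : String) : Int :=
  -- checkSum["A"] = checkSum["B"] = checkSum["N"] = 0 (chained assignment, N first)
  let checkSum : PySem.Dict Char Int :=
    (((PySem.Dict.empty).insert 'N' 0).insert 'B' 0).insert 'A' 0
  let checkSum := S.toList.foldl
    (fun d x => if x ∈ ['A', 'B', 'N'] then d.modify x 0 (· + 1) else d) checkSum
  solutionWhile (checkSum.getD 'A' 0) (checkSum.getD 'B' 0) (checkSum.getD 'N' 0) 0

-- ===== PORT B =====
def solution_alt (S : String) : Int :=
  min (PySem.Int.floordiv (PySem.Str.count S "A") 3)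
    (min (PySem.Str.count S "B" : Int)
      (PySem.Int.floordiv (PySem.Str.count S "N") 2))

-- ===== PRECONDITION & SPEC =====
def Spec_solution (S : String) (out : Int) : Prop := out = solution_alt S
instance (S : String) (out : Int) : Decidable (Spec_solution S out) := by unfold Spec_solution; infer_instance

-- ===== CLAIM (what is proved, stated in full; the proofs are below) =====
def Claim_equal_solution : Prop := ∀ (S : String), Dom_solution S → Spec_solution S (solution S)

-- ===== LEMMAS AND PROOFS =====

-- Python's str.count with a single-character needle is List.count on the code points
theorem charsCountGo_singleton (c : Char) :
    ∀ (fuel : Nat) (l : List Char) (acc : Nat), l.length ≤ fuel →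
      PySem.Chars.count.go [c] fuel l acc = acc + l.count c := by
  intro fuel
  induction fuel with
  | zero =>
    intro l acc h
    have : l = [] := by cases l <;> simp_all
    subst this
    simp [PySem.Chars.count.go]
  | succ k ih =>
    intro l acc h
    cases l with
    | nil => simp [PySem.Chars.count.go]
    | cons x t =>
      rw [PySem.Chars.count.go]
      by_cases hx : c = x
      · subst hx
        have hp : [c].isPrefixOf (c :: t) = true := by simp [List.isPrefixOf]
        simp only [hp, if_true, List.length_cons, List.length_nil, List.drop_succ_cons,
          List.drop_zero]
        rw [ih t (acc + 1) (by simpa using h)]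
        simp
        omega
      · have hpre : [c].isPrefixOf (x :: t) = false := by
          simp [List.isPrefixOf, hx]
        rw [hpre]
        simp only [Bool.false_eq_true, if_false]
        rw [ih t acc (by simpa using h)]
        have hxc : ¬ x = c := fun hh => hx hh.symm
        simp [hxc]

theorem strCount_singleton (s : String) (c : Char) :
    PySem.Str.count s (String.ofList [c]) = s.toList.count c := by
  rw [PySem.Str.count_eq]
  have : (String.ofList [c]).toList = [c] := by simp
  rw [this]
  unfold PySem.Chars.count
  simp only [List.isEmpty_cons, Bool.false_eq_true, if_false]
  simpa using charsCountGo_singleton c s.toList.length s.toList 0 le_rfl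

-- the A-side counting fold read back at a key of the A/B/N set
theorem foldCount (c : Char) (hc : c ∈ ['A', 'B', 'N']) :
    ∀ (l : List Char) (d : PySem.Dict Char Int),
      (l.foldl (fun d x => if x ∈ ['A', 'B', 'N'] then d.modify x 0 (· + 1) else d) d).getD c 0
        = d.getD c 0 + l.count c := by
  intro l
  induction l with
  | nil => intro d; simp
  | cons x t ih =>
    intro d
    simp only [List.foldl_cons]
    by_cases hx : x ∈ ['A', 'B', 'N']
    · rw [if_pos hx, ih]
      rw [PySem.Dict.getD_modify]
      by_cases hcx : c = x
      · subst hcx; simp; omega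
      · have hxc : ¬ x = c := fun hh => hcx hh.symm
        simp [hcx, hxc]
    · rw [if_neg hx, ih]
      have hne : x ≠ c := fun h => hx (h ▸ hc)
      simp [hne]

-- closed form of A's while loop
theorem solutionWhile_eq (k : Nat) :
    ∀ (a b n r : Int), a.toNat ≤ k → 0 ≤ a → 0 ≤ b → 0 ≤ n →
      solutionWhile a b n r = r + min (a / 3) (min b (n / 2)) := by
  induction k with
  | zero =>
    intro a b n r hk ha hb hn
    rw [solutionWhile]
    rw [dif_neg (by omega)]
    omega
  | succ k ih =>
    intro a b n r hk ha hb hn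
    rw [solutionWhile]
    by_cases h : 3 ≤ a ∧ 1 ≤ b ∧ 2 ≤ n
    · rw [dif_pos h]
      rw [ih (a - 3) (b - 1) (n - 2) (r + 1) (by omega) (by omega) (by omega) (by omega)]
      omega
    · rw [dif_neg h]
      omega

theorem floordiv_nonneg_eq (a b : Int) (hb : 0 ≤ b) : PySem.Int.floordiv a b = a / b := by
  simp [PySem.Int.floordiv, Int.fdiv_eq_ediv_of_nonneg a hb]

-- ===== VERDICT (by name: the statement is the Claim_ definition above) =====
theorem solution_spec : Claim_equal_solution := by
  intro S _
  unfold Spec_solution solution solution_alt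
  simp only []
  rw [foldCount 'A' (by decide), foldCount 'B' (by decide), foldCount 'N' (by decide)]
  have hA : ((((PySem.Dict.empty).insert 'N' (0:Int)).insert 'B' 0).insert 'A' 0).getD 'A' 0 = 0 := by decide
  have hB : ((((PySem.Dict.empty).insert 'N' (0:Int)).insert 'B' 0).insert 'A' 0).getD 'B' 0 = 0 := by decide
  have hN : ((((PySem.Dict.empty).insert 'N' (0:Int)).insert 'B' 0).insert 'A' 0).getD 'N' 0 = 0 := by decide
  rw [hA, hB, hN]
  have cA : PySem.Str.count S "A" = S.toList.count 'A' := strCount_singleton S 'A'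
  have cB : PySem.Str.count S "B" = S.toList.count 'B' := strCount_singleton S 'B'
  have cN : PySem.Str.count S "N" = S.toList.count 'N' := strCount_singleton S 'N'
  rw [cA, cB, cN]
  rw [solutionWhile_eq (0 + (S.toList.count 'A' : Int)).toNat _ _ _ _ le_rfl (by positivity) (by positivity) (by positivity)]
  rw [floordiv_nonneg_eq _ _ (by norm_num), floordiv_nonneg_eq _ _ (by norm_num)]
  omega
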